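-- pv_equiv track=rewrite | github.com/rcghpge/aoc-proofing-repo | 2024-cheat-sheet/day-9/day-9-alt.py | find_gaps
-- ===== SOURCE A (Python) =====
-- def find_gaps(values):
--     """Identify gaps in the sequence."""
--     gaps = {}
--     i = 0
--     while i < len(values):
--         if values[i] == '.':
--             start = i
--             while i < len(values) and values[i] == '.':
--                 i += 1
--             gaps[start] = i - start
--         else:
--             i += 1
--     return gaps
-- ===== SOURCE B (Python) =====
-- def find_gaps(values):
--     """Identify gaps in the sequence: single pass, emit a run when the value changes."""
--     gaps = {}
--     cur = None
--     start = 0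
--     for i, v in enumerate(values):
--         if v != cur:
--             if cur == '.':
--                 gaps[start] = i - start
--             cur = v
--             start = i
--     if cur == '.':
--         gaps[start] = len(values) - start
--     return gaps
-- ===== Notes on version B (the rewrite author's own statement) =====
-- stated objective: alternative
-- what changed: Replaced the nested index-based while loops (inner scan consuming each '.'-run) by a single flat pass over enumerate(values) that tracks the current run's value and start and emits a gap entry whenever the value changes (plus a final flush).
import Mathlib
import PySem

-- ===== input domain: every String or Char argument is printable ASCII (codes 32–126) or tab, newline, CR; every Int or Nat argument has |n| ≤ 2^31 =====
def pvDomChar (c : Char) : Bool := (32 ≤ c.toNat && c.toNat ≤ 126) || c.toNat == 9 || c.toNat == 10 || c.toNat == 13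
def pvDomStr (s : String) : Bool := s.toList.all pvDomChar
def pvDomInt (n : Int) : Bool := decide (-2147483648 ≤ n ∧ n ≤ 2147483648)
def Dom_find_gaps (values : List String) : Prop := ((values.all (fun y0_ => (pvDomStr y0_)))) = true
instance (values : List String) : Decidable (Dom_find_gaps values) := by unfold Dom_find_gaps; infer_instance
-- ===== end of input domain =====

-- B replaces A's nested index-based while loops by a single flat pass over enumerate(values)
-- that tracks the current run's value/start and emits a gap when the value changes (alternative decomposition, same cost).

-- ===== PORT A =====
-- inner while loop of A: advance i while i < len(values) and values[i] == '.', return final i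
def pvRunDot (values : List String) (i : Nat) : Nat :=
  if h : i < values.length then
    if values[i] = "." then pvRunDot values (i + 1) else i
  else i
termination_by values.length - i
decreasing_by omega

-- termination fact for the outer loop: the inner while strictly advances on a '.'
theorem pvRunDot_ge (values : List String) (i : Nat) : i ≤ pvRunDot values i := by
  induction i using pvRunDot.induct (values := values) with
  | case1 i h hd ih => rw [pvRunDot]; simp only [h, hd, dite_true, if_true]; omega
  | case2 i h hd => rw [pvRunDot]; simp [h, hd]
  | case3 i h => rw [pvRunDot]; simp [h]

theorem pvRunDot_gt (values : List String) (i : Nat) (h : i < values.length)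
    (hd : values[i] = ".") : i < pvRunDot values i := by
  rw [pvRunDot]; simp only [h, hd, dite_true, if_true]
  have := pvRunDot_ge values (i + 1); omega

-- outer while loop of A (gaps is the dict being built)
def pvGoA (values : List String) (i : Nat) (gaps : PySem.Dict Int Int) : PySem.Dict Int Int :=
  if h : i < values.length then
    if values[i] = "." then
      let j := pvRunDot values i
      pvGoA values j (gaps.insert (i : Int) ((j : Int) - (i : Int)))
    else pvGoA values (i + 1) gaps
  else gaps
termination_by values.length - i
decreasing_by
  · have := pvRunDot_gt values i h (by assumption); omega
  · omega

def find_gaps (values : List String) : List (Int × Int) :=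
  (pvGoA values 0 PySem.Dict.empty).items

-- ===== PORT B =====
-- one step of B's loop body: state = (gaps, cur, start), p = (i, v)
def pvStepB (st : PySem.Dict Int Int × Option String × Int) (p : Int × String) :
    PySem.Dict Int Int × Option String × Int :=
  if some p.2 ≠ st.2.1 then
    ((if st.2.1 = some "." then st.1.insert st.2.2 (p.1 - st.2.2) else st.1), some p.2, p.1)
  else st

-- B's final flush: if cur == '.', gaps[start] = len(values) - start
def pvFinB (st : PySem.Dict Int Int × Option String × Int) (n : Int) : PySem.Dict Int Int :=
  if st.2.1 = some "." then st.1.insert st.2.2 (n - st.2.2) else st.1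

def find_gaps_alt (values : List String) : List (Int × Int) :=
  (pvFinB ((PySem.List.enumerate values 0).foldl pvStepB (PySem.Dict.empty, none, 0))
      (values.length : Int)).items

-- ===== PRECONDITION & SPEC =====
def Spec_find_gaps (values : List String) (out : List (Int × Int)) : Prop := out = find_gaps_alt values
instance (values : List String) (out : List (Int × Int)) : Decidable (Spec_find_gaps values out) := by unfold Spec_find_gaps; infer_instance

-- ===== CLAIM (what is proved, stated in full; the proofs are below) =====
def Claim_equal_find_gaps : Prop := ∀ (values : List String), Dom_find_gaps values → Spec_find_gaps values (find_gaps values)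

-- ===== LEMMAS AND PROOFS =====

-- B's run from position i onward (proof-only helper)
def pvResFrom (values : List String) (i : Nat) (gaps : PySem.Dict Int Int)
    (c : Option String) (s : Int) : PySem.Dict Int Int :=
  pvFinB ((PySem.List.enumerate (values.drop i) (i : Int)).foldl pvStepB (gaps, c, s))
    (values.length : Int)

theorem pvRunDot_le (values : List String) (i : Nat) (h : i ≤ values.length) :
    pvRunDot values i ≤ values.length := by
  induction i using pvRunDot.induct (values := values) with
  | case1 i h1 hd ih => rw [pvRunDot]; simp only [h1, hd, dite_true, if_true]; exact ih (by omega)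
  | case2 i h1 hd => rw [pvRunDot]; simp only [h1, hd, dite_true, if_false]; omega
  | case3 i h1 => rw [pvRunDot]; simp only [h1, dite_false]; omega

theorem pvRunDot_dot (values : List String) (i : Nat) :
    ∀ m (hm : m < values.length), i ≤ m → m < pvRunDot values i → values[m] = "." := by
  induction i using pvRunDot.induct (values := values) with
  | case1 i h1 hd ih =>
      intro m hm him hmr
      rw [pvRunDot] at hmr; simp only [h1, hd, dite_true, if_true] at hmr
      rcases Nat.eq_or_lt_of_le him with rfl | hlt
      · exact hd
      · exact ih m hm hlt hmr
  | case2 i h1 hd => intro m hm him hmr; rw [pvRunDot] at hmr; simp [h1, hd] at hmr; omega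
  | case3 i h1 => intro m hm him hmr; rw [pvRunDot] at hmr; simp [h1] at hmr; omega

theorem pvRunDot_end (values : List String) (i : Nat) :
    ∀ m, pvRunDot values i = m → ∀ (hm : m < values.length), values[m] ≠ "." := by
  induction i using pvRunDot.induct (values := values) with
  | case1 i h1 hd ih =>
      intro m hme hm
      rw [pvRunDot] at hme; simp only [h1, hd, dite_true, if_true] at hme
      exact ih m hme hm
  | case2 i h1 hd =>
      intro m hme hm
      rw [pvRunDot] at hme; simp only [h1, hd, dite_true, if_false] at hme
      subst hme; exact hd
  | case3 i h1 =>
      intro m hme hm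
      rw [pvRunDot] at hme; simp only [h1, dite_false] at hme
      omega

-- skipping the interior of a '.'-run leaves B's state unchanged
theorem pvSkip (values : List String) (j : Nat) (hj : j ≤ values.length) :
    ∀ (n k : Nat) (gaps : PySem.Dict Int Int) (s0 : Int), j - k = n → k ≤ j →
    (∀ m (hm : m < values.length), k ≤ m → m < j → values[m] = ".") →
    (PySem.List.enumerate (values.drop k) (k : Int)).foldl pvStepB (gaps, some ".", s0)
      = (PySem.List.enumerate (values.drop j) (j : Int)).foldl pvStepB (gaps, some ".", s0) := by
  intro n
  induction n with
  | zero =>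
      intro k gaps s0 hn hk _
      obtain rfl : k = j := by omega
      rfl
  | succ n ih =>
      intro k gaps s0 hn hk hall
      have hkj : k < j := by omega
      have hklen : k < values.length := by omega
      rw [List.drop_eq_getElem_cons hklen, PySem.List.enumerate_cons, List.foldl_cons]
      have hdk : values[k] = "." := hall k hklen (le_refl _) hkj
      have hstep : pvStepB (gaps, some ".", s0) ((k : Int), values[k]) = (gaps, some ".", s0) := by
        simp [pvStepB, hdk]
      rw [hstep]
      have hcast : ((k : Int) + 1) = ((k + 1 : Nat) : Int) := by push_cast; ring
      rw [hcast]
      exact ih (k + 1) gaps s0 (by omega) (by omega)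
        (fun m hm h1 h2 => hall m hm (by omega) h2)

-- main invariant: A's outer loop from i equals B's run from i, for any non-'.' current value
theorem pvMain (n : Nat) : ∀ (values : List String) (i : Nat) (gaps : PySem.Dict Int Int)
    (c : Option String) (s : Int), values.length - i ≤ n → c ≠ some "." →
    pvGoA values i gaps = pvResFrom values i gaps c s := by
  induction n with
  | zero =>
      intro values i gaps c s hn hc
      have hi : values.length ≤ i := by omega
      rw [pvGoA, pvResFrom]
      simp only [Nat.not_lt.mpr hi, dite_false]
      rw [List.drop_eq_nil_of_le hi]
      simp [PySem.List.enumerate, pvFinB, hc]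
  | succ n ih =>
      intro values i gaps c s hn hc
      by_cases hi : i < values.length
      · rw [pvGoA, pvResFrom]
        simp only [hi, dite_true]
        rw [List.drop_eq_getElem_cons hi, PySem.List.enumerate_cons, List.foldl_cons]
        have hcast : ((i : Int) + 1) = ((i + 1 : Nat) : Int) := by push_cast; ring
        by_cases hd : values[i] = "."
        · simp only [hd, if_true]
          -- step at i: cur c ≠ '.', value is '.', so state becomes (gaps, some ".", i)
          have hne : (some "." : Option String) ≠ c := fun h => hc h.symm
          have hstep : pvStepB (gaps, c, s) ((i : Int), ".") = (gaps, some ".", (i : Int)) := by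
            simp only [pvStepB, if_pos hne, if_neg hc]
          rw [hstep, hcast]
          set j := pvRunDot values i with hjdef
          have hij : i < j := pvRunDot_gt values i hi hd
          have hjlen : j ≤ values.length := pvRunDot_le values i (by omega)
          have hskip := pvSkip values j hjlen (j - (i + 1)) (i + 1) gaps (i : Int) rfl (by omega)
            (fun m hm h1 h2 => pvRunDot_dot values i m hm (by omega) h2)
          rw [hskip]
          by_cases hjl : j < values.length
          · have hjd : values[j] ≠ "." := pvRunDot_end values i j rfl hjl
            rw [List.drop_eq_getElem_cons hjl, PySem.List.enumerate_cons, List.foldl_cons]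
            have hne2 : some values[j] ≠ some "." := by simpa using hjd
            have hstep2 : pvStepB (gaps, some ".", (i : Int)) ((j : Int), values[j])
                = (gaps.insert (i : Int) ((j : Int) - (i : Int)), some values[j], (j : Int)) := by
              simp [pvStepB, hne2]
            rw [hstep2]
            have hcast2 : ((j : Int) + 1) = ((j + 1 : Nat) : Int) := by push_cast; ring
            rw [hcast2]
            have hA : pvGoA values j (gaps.insert (i : Int) ((j : Int) - (i : Int)))
                = pvGoA values (j + 1) (gaps.insert (i : Int) ((j : Int) - (i : Int))) := by
              rw [pvGoA]; simp only [hjl, dite_true, if_neg hjd]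
            rw [hA]
            exact ih values (j + 1) _ (some values[j]) (j : Int) (by omega) (by simpa using hjd)
          · have hje : j = values.length := by omega
            have hA : pvGoA values j (gaps.insert (i : Int) ((j : Int) - (i : Int)))
                = gaps.insert (i : Int) ((j : Int) - (i : Int)) := by
              rw [pvGoA]; simp [hjl]
            rw [hA, List.drop_eq_nil_of_le (by omega)]
            simp [PySem.List.enumerate, pvFinB, hje]
        · simp only [hd, if_false]
          by_cases heq : some values[i] = c
          · have hstep : pvStepB (gaps, c, s) ((i : Int), values[i]) = (gaps, c, s) := by
              simp [pvStepB, heq]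
            rw [hstep, hcast]
            exact ih values (i + 1) gaps c s (by omega) hc
          · have hstep : pvStepB (gaps, c, s) ((i : Int), values[i])
                = (gaps, some values[i], (i : Int)) := by
              simp only [pvStepB, if_pos heq, if_neg hc]
            rw [hstep, hcast]
            exact ih values (i + 1) gaps (some values[i]) (i : Int) (by omega) (by simpa using hd)
      · rw [pvGoA, pvResFrom]
        simp only [hi, dite_false]
        rw [List.drop_eq_nil_of_le (by omega)]
        simp [PySem.List.enumerate, pvFinB, hc]

-- ===== VERDICT (by name: the statement is the Claim_ definition above) =====
theorem find_gaps_spec : Claim_equal_find_gaps := by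
  intro values _
  unfold Spec_find_gaps find_gaps find_gaps_alt
  have h := pvMain values.length values 0 PySem.Dict.empty none 0 (by omega) (by simp)
  rw [h, pvResFrom]
  simp
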